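-- pv_equiv track=rewrite | github.com/AlexeyGrushev/kmap_fastapi_backend | src/algorithm/scripts/find_kmap_islands.py | find_island_width
-- ===== SOURCE A (Python) =====
-- def is_degree_of_two(n):
--     return n > 0 and (n & (n - 1)) == 0
--
-- def find_island_width(kmap: list, number: tuple, height: int, width: int):
--     width_list = []
--
--     for i_h in range(height):
--
--         width_iter = 0
--
--         for i_w in range(width):
--             if kmap[
--                 (number[0] + i_h) % len(kmap)
--             ][
--                 (number[1] + i_w) % len(kmap)
--             ]:
--                 width_iter += 1
--             else:
--                 break
--
--         while not is_degree_of_two(width_iter):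
--             width_iter -= 1
--
--         width_list.append(width_iter)
--
--     return (height, min(width_list))
-- ===== SOURCE B (Python) =====
-- def find_island_width(kmap: list, number: tuple, height: int, width: int):
--     n = len(kmap)
--     r0, c0 = number[0], number[1]
--
--     def block_ok(lo, hi):
--         return all(
--             kmap[(r0 + i) % n][(c0 + j) % n]
--             for j in range(lo, hi)
--             for i in range(height)
--         )
--
--     p = 1
--     while 2 * p <= width and block_ok(p, 2 * p):
--         p *= 2
--     return (height, p)
-- ===== Notes on version B (the rewrite author's own statement) =====
-- stated objective: alternative
-- what changed: B never computes any row run length: it does a geometric doubling search, verifying column-major that the column block [p,2p) is all-truthy and doubling p while 2p <= width, instead of A's per-row run counting, per-row decrement-until-power-of-two loop and final min().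
-- outside the precondition, e.g. on find_island_width([[1, 0], [1]], (0, 0), 1, 1): A returns (1, 1), B returns (1, 1)
import Mathlib
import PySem

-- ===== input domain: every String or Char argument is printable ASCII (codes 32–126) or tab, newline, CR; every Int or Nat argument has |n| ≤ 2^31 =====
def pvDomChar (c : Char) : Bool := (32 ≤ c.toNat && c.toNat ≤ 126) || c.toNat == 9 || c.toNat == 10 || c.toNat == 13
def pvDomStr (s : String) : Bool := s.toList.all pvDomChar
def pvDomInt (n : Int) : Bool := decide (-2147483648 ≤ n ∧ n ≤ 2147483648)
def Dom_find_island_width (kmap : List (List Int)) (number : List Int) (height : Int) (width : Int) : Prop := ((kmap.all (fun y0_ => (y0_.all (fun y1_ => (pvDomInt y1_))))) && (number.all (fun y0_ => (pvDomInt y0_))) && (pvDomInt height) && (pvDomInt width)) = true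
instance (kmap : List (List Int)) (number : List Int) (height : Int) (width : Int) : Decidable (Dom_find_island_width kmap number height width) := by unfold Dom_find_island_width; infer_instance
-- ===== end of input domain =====

-- B replaces A's per-row run counting + per-row decrement-until-power-of-two loop + min()
-- by a geometric doubling search: verify column-major that the column block [p,2p) is
-- all-truthy and double p while 2p <= width, examining only the columns up to twice the
-- answer; equivalence proved on Pre_ below.

-- ===== PORT A =====
-- `n > 0 and (n & (n - 1)) == 0`
def is_degree_of_two (n : Int) : Bool :=
  decide (0 < n) && (PySem.Int.band n (n - 1) == 0)

-- A's `while not is_degree_of_two(width_iter): width_iter -= 1`.  For w ≤ 0 the Python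
-- loop never terminates; the `w ≤ 0` early exit only makes the Lean function total
-- there (such inputs are excluded by Pre_).
def pvFloorA (w : Int) : Int :=
  if is_degree_of_two w then w
  else if w ≤ 0 then w
  else pvFloorA (w - 1)
termination_by w.toNat
decreasing_by omega

-- A's inner `for i_w in range(width): if kmap[...][...]: width_iter += 1 else: break`,
-- as recursion over the range list with the running count w
def pvInnerA (kmap : List (List Int)) (n0 n1 i_h : Int) (idxs : List Int) (w : Int) : Int :=
  match idxs with
  | [] => w
  | i_w :: rest =>
    if PySem.List.pyGetD (PySem.List.pyGetD kmap (PySem.Int.mod (n0 + i_h) kmap.length) [])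
         (PySem.Int.mod (n1 + i_w) kmap.length) 0 ≠ 0
    then pvInnerA kmap n0 n1 i_h rest (w + 1)
    else w

def find_island_width (kmap : List (List Int)) (number : List Int) (height : Int) (width : Int) : List Int :=
  let n0 := PySem.List.pyGetD number 0 0
  let n1 := PySem.List.pyGetD number 1 0
  let width_list := (PySem.List.pyRange 0 height).foldl
    (fun acc i_h => acc ++ [pvFloorA (pvInnerA kmap n0 n1 i_h (PySem.List.pyRange 0 width) 0)]) []
  match PySem.List.min? width_list id with
  | some m => [height, m]
  | none => []  -- Python: min([]) raises ValueError; excluded by Pre_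

-- ===== PORT B =====
-- B's `block_ok(lo, hi)`: all cells in columns [lo,hi), rows [0,height) are truthy
def pvBlockOk (kmap : List (List Int)) (r0 c0 height lo hi : Int) : Bool :=
  (PySem.List.pyRange lo hi).all (fun j =>
    (PySem.List.pyRange 0 height).all (fun i =>
      PySem.List.pyGetD (PySem.List.pyGetD kmap (PySem.Int.mod (r0 + i) kmap.length) [])
        (PySem.Int.mod (c0 + j) kmap.length) 0 != 0))

-- B's `while 2*p <= width and block_ok(p, 2*p): p *= 2`.  The `1 ≤ p` conjunct is a
-- totality guard only: B always starts at p = 1 and doubles, so it is always true.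
def pvGrow (kmap : List (List Int)) (r0 c0 height width p : Int) : Int :=
  if h : 1 ≤ p ∧ 2 * p ≤ width ∧ pvBlockOk kmap r0 c0 height p (2 * p) = true
  then pvGrow kmap r0 c0 height width (2 * p)
  else p
termination_by (width - p).toNat
decreasing_by omega

def find_island_width_alt (kmap : List (List Int)) (number : List Int) (height : Int) (width : Int) : List Int :=
  let r0 := PySem.List.pyGetD number 0 0
  let c0 := PySem.List.pyGetD number 1 0
  [height, pvGrow kmap r0 c0 height width 1]

-- ===== PRECONDITION & SPEC =====
-- Pre_ excludes exactly: empty kmap (ZeroDivisionError), number shorter than 2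
-- (IndexError), height < 1 (A: min([]) raises), width < 1 or a scanned row whose first
-- scanned cell is falsy (A's decrement while-loop never terminates on a 0 run), and
-- ragged maps with a row shorter than len(kmap) — the natural K-map is square, and on
-- ragged maps a column index (… % len(kmap)) can raise IndexError.
def Pre_find_island_width (kmap : List (List Int)) (number : List Int) (height : Int) (width : Int) : Prop :=
  kmap ≠ [] ∧ 2 ≤ number.length ∧ 1 ≤ height ∧ 1 ≤ width ∧
  (∀ row ∈ kmap, kmap.length ≤ row.length) ∧
  (∀ i_h ∈ PySem.List.pyRange 0 height,
    PySem.List.pyGetD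
      (PySem.List.pyGetD kmap (PySem.Int.mod ((PySem.List.pyGetD number 0 0) + i_h) kmap.length) [])
      (PySem.Int.mod (PySem.List.pyGetD number 1 0) kmap.length) 0 ≠ 0)
instance (kmap : List (List Int)) (number : List Int) (height : Int) (width : Int) : Decidable (Pre_find_island_width kmap number height width) := by unfold Pre_find_island_width; infer_instance

def pvWitness_find_island_width : List (List Int) × List Int × Int × Int := ([[1, 1], [1, 0]], [0, 0], 2, 2)

def Spec_find_island_width (kmap : List (List Int)) (number : List Int) (height : Int) (width : Int) (out : List Int) : Prop := out = find_island_width_alt kmap number height width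
instance (kmap : List (List Int)) (number : List Int) (height : Int) (width : Int) (out : List Int) : Decidable (Spec_find_island_width kmap number height width out) := by unfold Spec_find_island_width; infer_instance

-- ===== CLAIM (what is proved, stated in full; the proofs are below) =====
def Claim_equal_find_island_width : Prop := ∀ (kmap : List (List Int)) (number : List Int) (height : Int) (width : Int), Dom_find_island_width kmap number height width → Pre_find_island_width kmap number height width → Spec_find_island_width kmap number height width (find_island_width kmap number height width)

-- ===== LEMMAS AND PROOFS =====

theorem pv_bl_eq (x j : Nat) (h1 : 2 ^ j ≤ x) (h2 : x < 2 ^ (j + 1)) :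
    PySem.Int.bitLength (x : Int) = j + 1 := by
  have hx0 : (x : Int) ≠ 0 := by
    have : 0 < 2 ^ j := Nat.two_pow_pos j
    simp; omega
  have hb1 := PySem.Int.two_pow_bitLength_le (x : Int) hx0
  have hb2 := PySem.Int.lt_two_pow_bitLength (x : Int)
  rw [Int.natAbs_natCast] at hb1 hb2
  set b := PySem.Int.bitLength (x : Int) with hb
  have hbpos : 1 ≤ b := by
    by_contra h
    have : b = 0 := by omega
    rw [this] at hb2; simp at hb2
    have : 0 < 2 ^ j := Nat.two_pow_pos j
    omega
  by_contra hne
  rcases Nat.lt_or_ge b (j + 1) with h | h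
  · have : (2:Nat) ^ b ≤ 2 ^ j := Nat.pow_le_pow_right (by norm_num) (by omega)
    omega
  · have : (2:Nat) ^ (j + 1) ≤ 2 ^ (b - 1) := Nat.pow_le_pow_right (by norm_num) (by omega)
    omega

theorem pv_pow_degree (k : Nat) : is_degree_of_two ((2 ^ k : Nat) : Int) = true := by
  have hpos : 0 < (2:Nat) ^ k := Nat.two_pow_pos k
  have hc : ((2 ^ k : Nat) : Int) - 1 = (((2 ^ k - 1 : Nat)) : Int) := by omega
  simp only [is_degree_of_two, hc, PySem.Int.band_natCast]
  rw [Nat.and_two_pow_sub_one_eq_mod]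
  simp

theorem pv_degree_pow (m : Int) (h : is_degree_of_two m = true) :
    ∃ k : Nat, m = ((2 ^ k : Nat) : Int) := by
  simp only [is_degree_of_two, Bool.and_eq_true, decide_eq_true_eq, beq_iff_eq] at h
  obtain ⟨hpos, hband⟩ := h
  set x := m.toNat with hx
  have hm : m = (x : Int) := by omega
  have hm1 : m - 1 = ((x - 1 : Nat) : Int) := by omega
  rw [hm1] at hband; rw [hm] at hband; rw [PySem.Int.band_natCast] at hband
  have hland : x &&& (x - 1) = 0 := by exact_mod_cast hband
  have hx1 : 1 ≤ x := by omega
  have hx0 : (x : Int) ≠ 0 := by simp; omega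
  have hb1 := PySem.Int.two_pow_bitLength_le (x : Int) hx0
  have hb2 := PySem.Int.lt_two_pow_bitLength (x : Int)
  rw [Int.natAbs_natCast] at hb1 hb2
  set b := PySem.Int.bitLength (x : Int) with hbdef
  have hbpos : 1 ≤ b := by
    by_contra hcon
    have : b = 0 := by omega
    rw [this] at hb2; simp at hb2; omega
  set j := b - 1 with hj
  have hbj : b = j + 1 := by omega
  rw [hbj] at hb2
  refine ⟨j, ?_⟩
  by_contra hne
  have hxj : x ≠ 2 ^ j := by
    intro hcon; apply hne; rw [hm, hcon]
  have hlt : 2 ^ j < x := by omega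
  have ht1 : x.testBit j = true := by
    rw [Nat.testBit_eq_decide_div_mod_eq]
    have hpow : (2:Nat) ^ (j+1) = 2 * 2 ^ j := by ring
    have : x / 2 ^ j = 1 := Nat.div_eq_of_lt_le (by omega) (by omega)
    simp [this]
  have ht2 : (x - 1).testBit j = true := by
    rw [Nat.testBit_eq_decide_div_mod_eq]
    have hpow : (2:Nat) ^ (j+1) = 2 * 2 ^ j := by ring
    have : (x - 1) / 2 ^ j = 1 := Nat.div_eq_of_lt_le (by omega) (by omega)
    simp [this]
  have : (x &&& (x - 1)).testBit j = true := by
    rw [Nat.testBit_land, ht1, ht2]; rfl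
  rw [hland] at this
  simp at this

theorem pvFloorA_eq : ∀ (k : Nat) (m : Int), m.toNat = k → 1 ≤ m →
    pvFloorA m = ((2 ^ (PySem.Int.bitLength m - 1) : Nat) : Int) := by
  intro k
  induction k using Nat.strong_induction_on with
  | _ k ih =>
    intro m hk hm
    rw [pvFloorA]
    by_cases hd : is_degree_of_two m = true
    · rw [if_pos hd]
      obtain ⟨j, hj⟩ := pv_degree_pow m hd
      rw [hj, pv_bl_eq (2^j) j (le_refl _) (by have := Nat.two_pow_pos j; omega)]
      simp
    · rw [if_neg hd, if_neg (by omega)]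
      have hone : is_degree_of_two 1 = true := by decide
      have hm2 : 2 ≤ m := by
        rcases Int.lt_or_le m 2 with h | h
        · exfalso; apply hd; have : m = 1 := by omega
          rw [this]; exact hone
        · exact h
      have ihm := ih (m - 1).toNat (by omega) (m - 1) rfl (by omega)
      rw [ihm]
      set x := m.toNat with hx
      have hmx : m = (x : Int) := by omega
      have hx0 : (x : Int) ≠ 0 := by simp; omega
      have hb1 := PySem.Int.two_pow_bitLength_le (x : Int) hx0
      have hb2 := PySem.Int.lt_two_pow_bitLength (x : Int)
      rw [Int.natAbs_natCast] at hb1 hb2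
      set b := PySem.Int.bitLength (x : Int) with hbdef
      have hbpos : 1 ≤ b := by
        by_contra hcon
        have : b = 0 := by omega
        rw [this] at hb2; simp at hb2; omega
      have hbj : b = (b - 1) + 1 := by omega
      have hxne : x ≠ 2 ^ (b - 1) := by
        intro hcon
        apply hd
        rw [hmx, hcon]; exact pv_pow_degree (b - 1)
      have hlt : 2 ^ (b - 1) < x := by omega
      have hm1x : m - 1 = ((x - 1 : Nat) : Int) := by omega
      have hble : PySem.Int.bitLength (m - 1) = b := by
        rw [hm1x, pv_bl_eq (x - 1) (b - 1) (by omega) (by rw [← hbj]; omega)]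
        omega
      rw [hble, hmx]

-- the power-of-two floor, bracketed: 2^a ≤ m < 2^(a+1) → pvFloorA m = 2^a
theorem pv_floor_char (m : Int) (a : Nat)
    (h1 : ((2 ^ a : Nat) : Int) ≤ m) (h2 : m < ((2 ^ (a + 1) : Nat) : Int)) :
    pvFloorA m = ((2 ^ a : Nat) : Int) := by
  have hpos : 0 < (2:Nat) ^ a := Nat.two_pow_pos a
  have hm1 : 1 ≤ m := by omega
  rw [pvFloorA_eq m.toNat m rfl hm1]
  have hmx : m = (m.toNat : Int) := by omega
  rw [hmx] at h1 h2 ⊢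
  have hb : PySem.Int.bitLength ((m.toNat : Nat) : Int) = a + 1 :=
    pv_bl_eq m.toNat a (by exact_mod_cast h1) (by exact_mod_cast h2)
  rw [hb]
  simp

theorem pvFloorA_mono (a bb : Int) (ha : 1 ≤ a) (hab : a ≤ bb) : pvFloorA a ≤ pvFloorA bb := by
  rw [pvFloorA_eq a.toNat a rfl ha, pvFloorA_eq bb.toNat bb rfl (by omega)]
  have h1 : PySem.Int.bitLength a ≤ PySem.Int.bitLength bb := by
    by_contra hcon
    have ha0 : a ≠ 0 := by omega
    have hc1 := PySem.Int.two_pow_bitLength_le a ha0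
    have hc2 := PySem.Int.lt_two_pow_bitLength bb
    have : (2:Nat) ^ PySem.Int.bitLength bb ≤ 2 ^ (PySem.Int.bitLength a - 1) :=
      Nat.pow_le_pow_right (by norm_num) (by omega)
    have haa : a.natAbs = a.toNat := by omega
    have hbb : bb.natAbs = bb.toNat := by omega
    omega
  have : (2:Nat) ^ (PySem.Int.bitLength a - 1) ≤ 2 ^ (PySem.Int.bitLength bb - 1) :=
    Nat.pow_le_pow_right (by norm_num) (by omega)
  exact_mod_cast this

-- floor commutes with the binary minimum step
theorem pvFloorA_min (a bb : Int) (ha : 1 ≤ a) (hb : 1 ≤ bb) :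
    pvFloorA (if bb < a then bb else a)
      = if pvFloorA bb < pvFloorA a then pvFloorA bb else pvFloorA a := by
  by_cases h : bb < a
  · rw [if_pos h]
    have := pvFloorA_mono bb a hb (by omega)
    by_cases h2 : pvFloorA bb < pvFloorA a
    · rw [if_pos h2]
    · rw [if_neg h2]; omega
  · rw [if_neg h]
    have := pvFloorA_mono a bb ha (by omega)
    by_cases h2 : pvFloorA bb < pvFloorA a
    · rw [if_pos h2]; omega
    · rw [if_neg h2]

theorem pv_min?_cons (x : Int) (xs : List Int) :
    PySem.List.min? (x :: xs) id
      = some (List.foldl (fun acc y => if y < acc then y else acc) x xs) := by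
  simp only [PySem.List.min?, List.foldl_cons, id_eq]
  induction xs generalizing x with
  | nil => rfl
  | cons y ys ih =>
    simp only [List.foldl_cons]
    by_cases h : y < x
    · rw [if_pos h, if_pos h, ih]
    · rw [if_neg h, if_neg h, ih]

theorem pv_foldmin_pos (l : List Int) : ∀ (b : Int), 1 ≤ b → (∀ y ∈ l, 1 ≤ y) →
    1 ≤ List.foldl (fun acc x => if x < acc then x else acc) b l := by
  induction l with
  | nil => intro b hb _; exact hb
  | cons y l ihl =>
    intro b hb hl
    simp only [List.foldl_cons]
    have hy : 1 ≤ y := hl y (by simp)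
    refine ihl _ ?_ (fun z hz => hl z (by simp [hz]))
    by_cases h : y < b
    · rw [if_pos h]; exact hy
    · rw [if_neg h]; exact hb

theorem pv_foldmin_le (l : List Int) : ∀ (b : Int),
    List.foldl (fun acc x => if x < acc then x else acc) b l ≤ b ∧
    ∀ y ∈ l, List.foldl (fun acc x => if x < acc then x else acc) b l ≤ y := by
  induction l with
  | nil => intro b; exact ⟨le_refl b, by simp⟩
  | cons y l ihl =>
    intro b
    simp only [List.foldl_cons]
    obtain ⟨h1, h2⟩ := ihl (if y < b then y else b)
    constructor
    · refine le_trans h1 ?_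
      by_cases h : y < b
      · rw [if_pos h]; omega
      · rw [if_neg h]
    · intro z hz
      rcases List.mem_cons.1 hz with rfl | hz
      · refine le_trans h1 ?_
        by_cases h : z < b
        · rw [if_pos h]
        · rw [if_neg h]; omega
      · exact h2 z hz

theorem pv_foldmin_mem (l : List Int) : ∀ (b : Int),
    List.foldl (fun acc x => if x < acc then x else acc) b l ∈ b :: l := by
  induction l with
  | nil => intro b; simp
  | cons y l ihl =>
    intro b
    simp only [List.foldl_cons]
    rcases List.mem_cons.1 (ihl (if y < b then y else b)) with h | h
    · rw [h]
      by_cases hyb : y < b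
      · rw [if_pos hyb]; simp
      · rw [if_neg hyb]; simp
    · simp [h]

theorem pv_fold_min_map (l : List Int) : ∀ (b : Int), 1 ≤ b → (∀ y ∈ l, 1 ≤ y) →
    List.foldl (fun acc x => if x < acc then x else acc) (pvFloorA b) (l.map pvFloorA)
      = pvFloorA (List.foldl (fun acc x => if x < acc then x else acc) b l) := by
  induction l with
  | nil => intro b _ _; rfl
  | cons y l ihl =>
    intro b hb hl
    have hy : 1 ≤ y := hl y (by simp)
    simp only [List.map_cons, List.foldl_cons]
    rw [← pvFloorA_min b y hb hy]
    refine ihl _ ?_ (fun z hz => hl z (by simp [hz]))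
    by_cases h : y < b
    · rw [if_pos h]; exact hy
    · rw [if_neg h]; exact hb

-- spec of A's inner loop: the result r satisfies cnt ≤ r ≤ max cnt width, every scanned
-- column below r is truthy, and (if r < width) column r is falsy
theorem pvInnerA_spec (kmap : List (List Int)) (n0 n1 i_h width : Int) :
    ∀ (k : Nat) (cnt : Int), (width - cnt).toNat = k →
    let r := pvInnerA kmap n0 n1 i_h (PySem.List.pyRange cnt width) cnt
    cnt ≤ r ∧ r ≤ max cnt width ∧
    (∀ j, cnt ≤ j → j < r →
      PySem.List.pyGetD (PySem.List.pyGetD kmap (PySem.Int.mod (n0 + i_h) kmap.length) [])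
        (PySem.Int.mod (n1 + j) kmap.length) 0 ≠ 0) ∧
    (r < width →
      PySem.List.pyGetD (PySem.List.pyGetD kmap (PySem.Int.mod (n0 + i_h) kmap.length) [])
        (PySem.Int.mod (n1 + r) kmap.length) 0 = 0) := by
  intro k
  induction k using Nat.strong_induction_on with
  | _ k ih =>
    intro cnt hk
    by_cases hc : cnt < width
    · rw [PySem.List.pyRange_one_cons hc]
      simp only [pvInnerA]
      by_cases hcell : PySem.List.pyGetD
          (PySem.List.pyGetD kmap (PySem.Int.mod (n0 + i_h) kmap.length) [])
          (PySem.Int.mod (n1 + cnt) kmap.length) 0 ≠ 0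
      · rw [if_pos hcell]
        obtain ⟨ha, hb, hcells, hfail⟩ := ih (width - (cnt + 1)).toNat (by omega) (cnt + 1) rfl
        refine ⟨by omega, by omega, ?_, hfail⟩
        intro j hj1 hj2
        rcases eq_or_lt_of_le hj1 with rfl | hj1
        · exact hcell
        · exact hcells j (by omega) hj2
      · rw [if_neg hcell]
        push_neg at hcell
        exact ⟨le_refl _, by omega, by omega, fun _ => hcell⟩
    · have hnil : PySem.List.pyRange cnt width = [] := by
        simp [PySem.List.pyRange]; omega
      rw [hnil]
      simp only [pvInnerA]
      exact ⟨le_refl _, by omega, by omega, by omega⟩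

-- B's doubling loop computes the power-of-two floor of the minimum run M
theorem pvGrow_eq (kmap : List (List Int)) (r0 c0 height width M : Int)
    (hM1 : 1 ≤ M) (hMw : M ≤ width)
    (hcells : ∀ i ∈ PySem.List.pyRange 0 height, ∀ j, 0 ≤ j → j < M →
      PySem.List.pyGetD (PySem.List.pyGetD kmap (PySem.Int.mod (r0 + i) kmap.length) [])
        (PySem.Int.mod (c0 + j) kmap.length) 0 ≠ 0)
    (hstop : M = width ∨ ∃ i ∈ PySem.List.pyRange 0 height,
      PySem.List.pyGetD (PySem.List.pyGetD kmap (PySem.Int.mod (r0 + i) kmap.length) [])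
        (PySem.Int.mod (c0 + M) kmap.length) 0 = 0) :
    ∀ (k : Nat) (p : Int) (a : Nat), (width - p).toNat = k → p = ((2 ^ a : Nat) : Int) →
      p ≤ M → pvGrow kmap r0 c0 height width p = pvFloorA M := by
  intro k
  induction k using Nat.strong_induction_on with
  | _ k ih =>
    intro p a hk hpa hpM
    have hp1 : 1 ≤ p := by
      rw [hpa]
      exact_mod_cast Nat.one_le_two_pow
    rw [pvGrow]
    by_cases hcond : 1 ≤ p ∧ 2 * p ≤ width ∧ pvBlockOk kmap r0 c0 height p (2 * p) = true
    · rw [dif_pos hcond]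
      obtain ⟨-, hpw, hok⟩ := hcond
      have hokc : ∀ j ∈ PySem.List.pyRange p (2 * p), ∀ i ∈ PySem.List.pyRange 0 height,
          PySem.List.pyGetD (PySem.List.pyGetD kmap (PySem.Int.mod (r0 + i) kmap.length) [])
            (PySem.Int.mod (c0 + j) kmap.length) 0 ≠ 0 := by
        intro j hj i hi
        simp only [pvBlockOk, List.all_eq_true] at hok
        have := hok j hj i hi
        simpa using this
      have h2pM : 2 * p ≤ M := by
        by_contra hcon
        push_neg at hcon
        rcases hstop with rfl | ⟨i0, hi0, hfalse⟩
        · omega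
        · have : PySem.List.pyGetD (PySem.List.pyGetD kmap (PySem.Int.mod (r0 + i0) kmap.length) [])
              (PySem.Int.mod (c0 + M) kmap.length) 0 ≠ 0 :=
            hokc M (PySem.List.mem_pyRange_one.2 ⟨hpM, hcon⟩) i0 hi0
          exact this hfalse
      have h2pa : 2 * p = ((2 ^ (a + 1) : Nat) : Int) := by
        rw [hpa]; push_cast [pow_succ]; ring
      exact ih (width - 2 * p).toNat (by omega) (2 * p) (a + 1) rfl h2pa h2pM
    · rw [dif_neg hcond]
      -- show M < 2p, then pvFloorA M = 2^a = p
      have hM2p : M < 2 * p := by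
        by_contra hcon
        push_neg at hcon
        apply hcond
        refine ⟨hp1, by omega, ?_⟩
        simp only [pvBlockOk, List.all_eq_true]
        intro j hj i hi
        have hjb := PySem.List.mem_pyRange_one.1 hj
        have := hcells i hi j (by omega) (by omega)
        simpa using this
      rw [hpa] at hpM hM2p ⊢
      have hc2 : ((2 ^ (a + 1) : Nat) : Int) = 2 * ((2 ^ a : Nat) : Int) := by
        push_cast [pow_succ]; ring
      rw [pv_floor_char M a hpM (by omega)]

-- ===== VERDICT (by name: the statement is the Claim_ definition above) =====
theorem find_island_width_spec : Claim_equal_find_island_width := by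
  intro kmap number height width hdom hpre
  obtain ⟨hne, hnum, hh, hw, hrows, hfirst⟩ := hpre
  unfold Spec_find_island_width find_island_width find_island_width_alt
  simp only [PySem.List.foldl_append_singleton_eq_map, List.nil_append]
  set n0 := PySem.List.pyGetD number 0 0 with hn0
  set n1 := PySem.List.pyGetD number 1 0 with hn1
  set run := fun i_h => pvInnerA kmap n0 n1 i_h (PySem.List.pyRange 0 width) 0 with hrun
  set cell := fun i j => PySem.List.pyGetD
      (PySem.List.pyGetD kmap (PySem.Int.mod (n0 + i) kmap.length) [])
      (PySem.Int.mod (n1 + j) kmap.length) 0 with hcell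
  have hspec : ∀ i, 0 ≤ run i ∧ run i ≤ width ∧
      (∀ j, 0 ≤ j → j < run i → cell i j ≠ 0) ∧ (run i < width → cell i (run i) = 0) := by
    intro i
    obtain ⟨h1, h2, h3, h4⟩ := pvInnerA_spec kmap n0 n1 i width (width - 0).toNat 0 rfl
    have h2' : run i ≤ max 0 width := h2
    have h1' : (0 : Int) ≤ run i := h1
    exact ⟨h1', by omega, h3, h4⟩
  have hrpos : ∀ i ∈ PySem.List.pyRange 0 height, 1 ≤ run i := by
    intro i hi
    obtain ⟨-, -, -, h4⟩ := hspec i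
    by_contra hcon
    have hr0 : run i = 0 := by have := (hspec i).1; omega
    have := h4 (by omega)
    rw [hr0] at this
    have hf : cell i 0 ≠ 0 := by simpa [hcell, add_zero] using hfirst i hi
    exact hf this
  have hl : PySem.List.pyRange 0 height = 0 :: PySem.List.pyRange 1 height :=
    PySem.List.pyRange_one_cons (by omega)
  -- A's result is pvFloorA M for M the fold-minimum of the runs
  have hmm : List.map (fun i => pvFloorA (run i)) (PySem.List.pyRange 0 height)
      = List.map pvFloorA (List.map run (PySem.List.pyRange 0 height)) := by
    simp [List.map_map, Function.comp]
  rw [hmm, hl, List.map_cons, List.map_cons, pv_min?_cons]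
  have hr0 : 1 ≤ run 0 := hrpos 0 (by rw [hl]; exact List.mem_cons_self)
  have hmem1 : ∀ y ∈ List.map run (PySem.List.pyRange 1 height), 1 ≤ y := by
    intro y hy
    obtain ⟨i, hi, rfl⟩ := List.mem_map.1 hy
    exact hrpos i (by rw [hl]; exact List.mem_cons_of_mem _ hi)
  rw [pv_fold_min_map _ _ hr0 hmem1]
  set M := List.foldl (fun acc x => if x < acc then x else acc) (run 0)
      (List.map run (PySem.List.pyRange 1 height)) with hM
  have hM1 : 1 ≤ M := pv_foldmin_pos _ _ hr0 hmem1
  -- M is one of the runs, and ≤ every run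
  have hMmem : ∃ i0 ∈ PySem.List.pyRange 0 height, M = run i0 := by
    have := pv_foldmin_mem (List.map run (PySem.List.pyRange 1 height)) (run 0)
    rcases List.mem_cons.1 this with h | h
    · exact ⟨0, by rw [hl]; exact List.mem_cons_self, h⟩
    · obtain ⟨i, hi, hEq⟩ := List.mem_map.1 h
      exact ⟨i, by rw [hl]; exact List.mem_cons_of_mem _ hi, hEq.symm⟩
  have hMle : ∀ i ∈ PySem.List.pyRange 0 height, M ≤ run i := by
    intro i hi
    rw [hl] at hi
    rcases List.mem_cons.1 hi with rfl | hi
    · exact (pv_foldmin_le _ _).1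
    · exact (pv_foldmin_le _ _).2 _ (List.mem_map_of_mem hi)
  obtain ⟨i0, hi0, hMi0⟩ := hMmem
  have hMw : M ≤ width := by rw [hMi0]; exact (hspec i0).2.1
  -- B's doubling loop: feed pvGrow_eq
  have hB := pvGrow_eq kmap n0 n1 height width M hM1 hMw
    (by
      intro i hi j hj1 hj2
      exact (hspec i).2.2.1 j hj1 (by have := hMle i hi; omega))
    (by
      rcases eq_or_lt_of_le hMw with h | h
      · exact Or.inl h
      · refine Or.inr ⟨i0, hi0, ?_⟩
        rw [hMi0]
        exact (hspec i0).2.2.2 (by omega))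
    (width - 1).toNat 1 0 rfl (by norm_num) hM1

  rw [hB]
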